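-- pv_equiv track=rewrite | github.com/TheoLee021/LeetCode | SubString2.py | replace_substring
-- ===== SOURCE A (Python) =====
-- def replace_substring(text, old, new):
--     start_pos = text.find(old)
--     output = []
--
--     if start_pos == -1:
--         return text
--
--     i = 0
--     while i < start_pos:
--         output.append(text[i])
--         i += 1
--
--     output.append(new)
--
--     i = start_pos + len(old)
--     start_pos = text.find(old, start_pos + len(old))
--     if start_pos != -1:
--         while i < start_pos:
--             output.append(text[i])
--             i += 1
--
--         output.append(new)
--
--         i = start_pos + len(old)
--
--     while i < len(text):
--         output.append(text[i])
--         i += 1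
--
--     return ''.join(output)
-- ===== SOURCE B (Python) =====
-- def replace_substring(text, old, new):
--     parts = []
--     i = 0
--     count = 0
--     while count < 2:
--         pos = text.find(old, i)
--         if pos == -1:
--             break
--         parts.append(text[i:pos])
--         parts.append(new)
--         i = pos + len(old)
--         count += 1
--     parts.append(text[i:])
--     return ''.join(parts)
-- ===== Notes on version B (the rewrite author's own statement) =====
-- stated objective: simpler
-- what changed: Replaces A's hand-unrolled two occurrence blocks with char-by-char appends by one bounded find/slice loop (counter < 2) collecting slice segments joined at the end.
import Mathlib
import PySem

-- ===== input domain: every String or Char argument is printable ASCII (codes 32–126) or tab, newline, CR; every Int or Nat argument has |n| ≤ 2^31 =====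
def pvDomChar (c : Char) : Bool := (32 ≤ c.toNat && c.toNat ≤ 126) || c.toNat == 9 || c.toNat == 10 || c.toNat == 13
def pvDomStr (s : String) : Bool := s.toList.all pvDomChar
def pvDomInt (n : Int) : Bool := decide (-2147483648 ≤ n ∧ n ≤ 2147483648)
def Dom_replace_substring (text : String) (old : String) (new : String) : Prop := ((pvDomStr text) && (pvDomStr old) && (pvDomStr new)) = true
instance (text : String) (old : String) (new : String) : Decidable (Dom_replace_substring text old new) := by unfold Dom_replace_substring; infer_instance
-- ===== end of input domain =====

-- B replaces A's two hand-unrolled replacement blocks (char-by-char appends) with one bounded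
-- find/slice loop collecting segments; same return value, different decomposition.

-- ===== PORT A =====
-- Transliteration of A. Python's output list of strings is a List (List Char), ''.join is
-- Chars.join []. text[i] inside the while loops is always in range (i < start_pos ≤ len(text)),
-- so the totalising default of pyGetD is never returned.
def replace_substring (text : String) (old : String) (new : String) : String :=
  let cs := text.toList
  let os := old.toList
  let sp0 := PySem.Chars.find cs os
  if sp0 = -1 then text
  else
    -- while i < start_pos: output.append(text[i]); i += 1
    let out1 : List (List Char) :=
      (PySem.List.pyRange 0 sp0 1).foldl (fun acc j => acc ++ [[PySem.List.pyGetD cs j ' ']]) []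
    let out2 := out1 ++ [new.toList]
    let i1 : Int := sp0 + os.length
    let sp1 := PySem.Chars.findFrom cs os i1 none
    let st :=
      if sp1 ≠ -1 then
        (((PySem.List.pyRange i1 sp1 1).foldl (fun acc j => acc ++ [[PySem.List.pyGetD cs j ' ']]) out2)
           ++ [new.toList], sp1 + os.length)
      else (out2, i1)
    let out4 := (PySem.List.pyRange st.2 cs.length 1).foldl (fun acc j => acc ++ [[PySem.List.pyGetD cs j ' ']]) st.1
    String.ofList (PySem.Chars.join [] out4)

-- ===== PORT B =====
-- Bounded while-loop of Source B: fuel = remaining iterations (2 - count).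
def pvAltLoop (cs os ns : List Char) : Nat → Int → List (List Char) → List (List Char)
  | 0, i, parts => parts ++ [PySem.List.slice cs (some i) none]
  | rem + 1, i, parts =>
    let pos := PySem.Chars.findFrom cs os i none
    if pos = -1 then parts ++ [PySem.List.slice cs (some i) none]
    else pvAltLoop cs os ns rem (pos + os.length)
           (parts ++ [PySem.List.slice cs (some i) (some pos), ns])

def replace_substring_alt (text : String) (old : String) (new : String) : String :=
  String.ofList (PySem.Chars.join [] (pvAltLoop text.toList old.toList new.toList 2 0 []))

-- ===== PRECONDITION & SPEC =====
def Spec_replace_substring (text : String) (old : String) (new : String) (out : String) : Prop := out = replace_substring_alt text old new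
instance (text : String) (old : String) (new : String) (out : String) : Decidable (Spec_replace_substring text old new out) := by unfold Spec_replace_substring; infer_instance

-- ===== CLAIM (what is proved, stated in full; the proofs are below) =====
def Claim_equal_replace_substring : Prop := ∀ (text : String) (old : String) (new : String), Dom_replace_substring text old new → Spec_replace_substring text old new (replace_substring text old new)

-- ===== LEMMAS AND PROOFS =====

-- a foldl that only pushes is init ++ map
theorem pv_foldl_push {α β : Type} (f : α → β) (l : List α) (init : List β) :
    l.foldl (fun acc j => acc ++ [f j]) init = init ++ l.map f := by
  induction l generalizing init with
  | nil => simp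
  | cons x t ih => simp [List.foldl_cons, ih, List.append_assoc]

-- ''.join is flatten
theorem pv_join_nil_flatten (l : List (List Char)) :
    PySem.Chars.join [] l = l.flatten := by
  induction l with
  | nil => simp [PySem.Chars.join, List.intercalate]
  | cons x t ih =>
    cases t with
    | nil => simp [PySem.Chars.join, List.intercalate]
    | cons y u =>
      simp only [PySem.Chars.join] at ih ⊢
      simp only [List.intercalate, List.intersperse] at ih ⊢; simp_all

-- the char-collecting range maps to a slice (Nat bounds)
theorem pv_seg_nat (cs : List Char) (d : Char) (a b : Nat) (hb : b ≤ cs.length) :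
    (PySem.List.pyRange (a : Int) (b : Int) 1).map (fun j => PySem.List.pyGetD cs j d)
      = (cs.drop a).take (b - a) := by
  rw [PySem.List.pyRange_one]
  have h1 : ((b : Int) - (a : Int)).toNat = b - a := by omega
  rw [h1, List.map_map]
  apply List.ext_getElem
  · simp; omega
  · intro i h1' h2'
    simp only [List.getElem_map, List.getElem_range, Function.comp_apply]
    have hi : i < b - a := by simpa using h1'
    have hidx : a + i < cs.length := by omega
    have : PySem.List.pyGetD cs ((a : Int) + (i : Int)) d = cs[a + i] := by
      rw [show ((a : Int) + (i : Int)) = ((a + i : Nat) : Int) by push_cast; ring]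
      rw [PySem.List.pyGetD_natCast]
      simp [List.getD, hidx]
    simpa only [this] using (List.getElem_take.trans (List.getElem_drop ..)).symm

theorem pv_flatten_singletons {α β : Type} (f : α → β) (l : List α) :
    (l.map (fun x => [f x])).flatten = l.map f := by
  induction l <;> simp_all

theorem pv_seg_int (cs : List Char) (d : Char) (a b : Int) (ha : 0 ≤ a)
    (hb : b ≤ (cs.length : Int)) :
    (PySem.List.pyRange a b 1).map (fun j => PySem.List.pyGetD cs j d)
      = (cs.drop a.toNat).take (b - a).toNat := by
  rcases le_or_gt b a with h | h
  · rw [PySem.List.pyRange_one_eq_nil h]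
    simp [show (b - a).toNat = 0 by omega]
  · have h2 := pv_seg_nat cs d a.toNat b.toNat (by omega)
    rw [show a = (a.toNat : Int) by omega, show b = (b.toNat : Int) by omega, h2,
      show ((b.toNat : Int) - (a.toNat : Int)).toNat = b.toNat - a.toNat by omega,
      show ((a.toNat : Int)).toNat = a.toNat by omega]

theorem pv_tail_seg (cs : List Char) (d : Char) (x : Int) (hx : 0 ≤ x) :
    (PySem.List.pyRange x (cs.length : Int) 1).map (fun j => PySem.List.pyGetD cs j d)
      = cs.drop x.toNat := by
  rw [pv_seg_int cs d x _ hx le_rfl]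
  exact List.take_of_length_le (by simp; omega)

-- ===== VERDICT (by name: the statement is the Claim_ definition above) =====
theorem replace_substring_spec : Claim_equal_replace_substring := by
  intro text old new _
  unfold Spec_replace_substring replace_substring replace_substring_alt
  by_cases h0 : PySem.Chars.find text.toList old.toList = -1
  · simp [h0, pvAltLoop, PySem.List.slice_none_none]
  · set cs := text.toList with hcs
    set os := old.toList with hos
    set p := PySem.Chars.find cs os with hp
    have hp0 : 0 ≤ p := by have := PySem.Chars.neg_one_le_find cs os; omega
    have hplen : p ≤ (cs.length : Int) := PySem.Chars.find_le_length cs os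
    have hpre : os <+: cs.drop p.toNat := (PySem.Chars.find_spec hp0).1
    have hklen : p.toNat + os.length ≤ cs.length := by
      have := hpre.length_le
      simp [List.length_drop] at this
      omega
    have hk : (p + (os.length : Int)) = ((p.toNat + os.length : Nat) : Int) := by omega
    by_cases hq : PySem.Chars.find (cs.drop (p.toNat + os.length)) os = -1
    · have hfrom : PySem.Chars.findFrom cs os (p + (os.length : Int)) none = -1 := by
        rw [hk, PySem.Chars.findFrom_natCast cs os _ (by omega), if_pos hq]
      simp only [if_neg h0, pvAltLoop, PySem.Chars.findFrom_zero, ← hp, hfrom,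
        pv_join_nil_flatten, pv_foldl_push, pv_flatten_singletons, if_neg h0]
      simp [pv_join_nil_flatten, pv_seg_int cs ' ' 0 p le_rfl hplen,
        pv_tail_seg cs ' ' (p + (os.length : Int)) (by omega),
        PySem.List.slice_from _ (show (0:Int) ≤ p + (os.length : Int) by omega),
        PySem.List.slice_toNat _ (le_refl (0:Int)) hp0]
      rw [pv_flatten_singletons, pv_flatten_singletons,
        pv_seg_int cs ' ' 0 p le_rfl hplen,
        pv_tail_seg cs ' ' (p + (os.length : Int)) (by omega)]
      simp
    · have hf20 : 0 ≤ PySem.Chars.find (cs.drop (p.toNat + os.length)) os := by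
        have := PySem.Chars.neg_one_le_find (cs.drop (p.toNat + os.length)) os; omega
      have hf2len := PySem.Chars.find_le_length (cs.drop (p.toNat + os.length)) os
      set f2 := PySem.Chars.find (cs.drop (p.toNat + os.length)) os with hf2
      have hfrom : PySem.Chars.findFrom cs os (p + (os.length : Int)) none
          = ((p.toNat + os.length : Nat) : Int) + f2 := by
        rw [hk, PySem.Chars.findFrom_natCast cs os _ (by omega), if_neg hq]
      have hqlen : ((p.toNat + os.length : Nat) : Int) + f2 ≤ (cs.length : Int) := by
        simp [List.length_drop] at hf2len; omega
      have hne : ((p.toNat + os.length : Nat) : Int) + f2 ≠ -1 := by omega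
      simp only [pvAltLoop, PySem.Chars.findFrom_zero, ← hp, hfrom, if_neg h0, if_pos hne,
        pv_foldl_push, pv_join_nil_flatten]
      rw [hk, if_neg hne]
      simp only [List.flatten_append, List.flatten_cons, List.flatten_nil, List.nil_append,
        List.append_nil]
      rw [pv_flatten_singletons, pv_flatten_singletons, pv_flatten_singletons,
        pv_seg_int cs ' ' 0 p le_rfl hplen,
        pv_seg_int cs ' ' _ _ (by omega) hqlen,
        pv_tail_seg cs ' ' _ (by omega)]
      simp [PySem.List.slice_toNat _ (le_refl (0:Int)) hp0,
        PySem.List.slice_toNat _ (show (0:Int) ≤ ((p.toNat + os.length : Nat) : Int) by omega)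
          (show (0:Int) ≤ ((p.toNat + os.length : Nat) : Int) + f2 by omega),
        PySem.List.slice_from _ (show (0:Int) ≤ ((p.toNat + os.length : Nat) : Int) + f2 + (os.length : Int) by omega)]
      rw [max_eq_left hp0,
        PySem.List.slice_toNat cs (show (0:Int) ≤ p + (os.length : Int) by omega)
          (show (0:Int) ≤ p + (os.length : Int) + f2 by omega),
        PySem.List.slice_from cs (show (0:Int) ≤ p + (os.length : Int) + f2 + (os.length : Int) by omega),
        show ((p + (os.length : Int) + f2).toNat - (p + (os.length : Int)).toNat) = f2.toNat by omega]
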